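-- pv_equiv track=rewrite | github.com/Loflou-Inc/VALIS | cloud/watermark_engine.py | filter_output
-- ===== SOURCE A (Python) =====
-- from typing import Dict, Any, Optional
--
-- def filter_output(content: str, agent_id: str,
--                  user_permissions: Dict[str, Any]) -> str:
--     """Filter output based on user permissions and safety"""
--     # Check for sensitive content that shouldn't be exposed
--     sensitive_patterns = [
--         "DATABASE_PASSWORD",
--         "API_SECRET",
--         "MASTER_KEY",
--         "ADMIN_TOKEN"
--     ]
--
--     filtered_content = content
--     for pattern in sensitive_patterns:
--         if pattern in filtered_content:
--             filtered_content = filtered_content.replace(pattern, "[REDACTED]")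
--
--     return filtered_content
-- ===== SOURCE B (Python) =====
-- def filter_output(content, agent_id, user_permissions):
--     """Filter output based on user permissions and safety (single-pass scan)."""
--     patterns = ("DATABASE_PASSWORD", "API_SECRET", "MASTER_KEY", "ADMIN_TOKEN")
--     out = []
--     i = 0
--     n = len(content)
--     while i < n:
--         for p in patterns:
--             if content.startswith(p, i):
--                 out.append("[REDACTED]")
--                 i += len(p)
--                 break
--         else:
--             out.append(content[i])
--             i += 1
--     return "".join(out)
-- ===== Notes on version B (the rewrite author's own statement) =====
-- stated objective: alternative
-- what changed: Replaces four sequential whole-string membership-test-plus-replace passes by a single left-to-right scan that tries the four literal patterns at each position and emits [REDACTED] or the current character, building the result in one pass.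
import Mathlib
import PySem

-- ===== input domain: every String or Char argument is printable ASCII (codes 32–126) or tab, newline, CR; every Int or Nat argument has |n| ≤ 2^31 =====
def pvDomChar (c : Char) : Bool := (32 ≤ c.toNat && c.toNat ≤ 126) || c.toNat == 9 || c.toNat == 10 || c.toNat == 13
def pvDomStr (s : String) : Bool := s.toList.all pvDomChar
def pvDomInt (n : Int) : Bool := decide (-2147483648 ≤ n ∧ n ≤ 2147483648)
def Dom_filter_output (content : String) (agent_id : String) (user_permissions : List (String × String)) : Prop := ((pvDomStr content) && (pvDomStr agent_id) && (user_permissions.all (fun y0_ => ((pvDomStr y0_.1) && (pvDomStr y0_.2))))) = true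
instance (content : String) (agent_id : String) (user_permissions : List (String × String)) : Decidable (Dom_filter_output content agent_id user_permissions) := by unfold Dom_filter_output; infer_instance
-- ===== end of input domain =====

-- B replaces A's four sequential membership-test-plus-replace passes by one left-to-right scan
-- trying the four literal patterns at each position (objective: alternative; same return value).

-- ===== PORT A =====
def filter_output (content : String) (agent_id : String) (user_permissions : List (String × String)) : String :=
  let sensitive_patterns := ["DATABASE_PASSWORD", "API_SECRET", "MASTER_KEY", "ADMIN_TOKEN"]
  sensitive_patterns.foldl
    (fun filtered_content pattern =>
      if PySem.Str.isIn pattern filtered_content then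
        PySem.Str.replace filtered_content pattern "[REDACTED]"
      else filtered_content)
    content

-- ===== PORT B =====
-- the four literal patterns and the replacement, as char lists (B scans the string once)
def pvP1 : List Char := "DATABASE_PASSWORD".toList
def pvP2 : List Char := "API_SECRET".toList
def pvP3 : List Char := "MASTER_KEY".toList
def pvP4 : List Char := "ADMIN_TOKEN".toList
def pvRED : List Char := "[REDACTED]".toList

-- B's while-loop: at each position try the patterns in order; emit [REDACTED] and skip, or copy one char
def pvRedact : List Char → List Char
  | [] => []
  | c :: t =>
    if pvP1.isPrefixOf (c :: t) then pvRED ++ pvRedact ((c :: t).drop pvP1.length)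
    else if pvP2.isPrefixOf (c :: t) then pvRED ++ pvRedact ((c :: t).drop pvP2.length)
    else if pvP3.isPrefixOf (c :: t) then pvRED ++ pvRedact ((c :: t).drop pvP3.length)
    else if pvP4.isPrefixOf (c :: t) then pvRED ++ pvRedact ((c :: t).drop pvP4.length)
    else c :: pvRedact t
termination_by s => s.length
decreasing_by
  · have h : pvP1.length = 17 := by decide
    simp only [List.length_drop, List.length_cons]; omega
  · have h : pvP2.length = 10 := by decide
    simp only [List.length_drop, List.length_cons]; omega
  · have h : pvP3.length = 10 := by decide
    simp only [List.length_drop, List.length_cons]; omega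
  · have h : pvP4.length = 11 := by decide
    simp only [List.length_drop, List.length_cons]; omega
  · simp only [List.length_cons]; omega

def filter_output_alt (content : String) (agent_id : String) (user_permissions : List (String × String)) : String :=
  String.ofList (pvRedact content.toList)

-- ===== PRECONDITION & SPEC =====
def Spec_filter_output (content : String) (agent_id : String) (user_permissions : List (String × String)) (out : String) : Prop := out = filter_output_alt content agent_id user_permissions
instance (content : String) (agent_id : String) (user_permissions : List (String × String)) (out : String) : Decidable (Spec_filter_output content agent_id user_permissions out) := by unfold Spec_filter_output; infer_instance

-- ===== CLAIM (what is proved, stated in full; the proofs are below) =====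
def Claim_equal_filter_output : Prop := ∀ (content : String) (agent_id : String) (user_permissions : List (String × String)), Dom_filter_output content agent_id user_permissions → Spec_filter_output content agent_id user_permissions (filter_output content agent_id user_permissions)

-- ===== LEMMAS AND PROOFS =====

-- a structurally recursive (fuel-free) model of PySem.Chars.replace for a nonempty pattern
def pvF (old new : List Char) : List Char → List Char
  | [] => []
  | c :: t =>
    if h : old.isPrefixOf (c :: t) ∧ old ≠ [] then new ++ pvF old new ((c :: t).drop old.length)
    else c :: pvF old new t
termination_by s => s.length
decreasing_by
  · have h2 : old.length ≠ 0 := by simpa using h.2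
    simp only [List.length_drop, List.length_cons]; omega
  · simp only [List.length_cons]; omega

lemma pvF_nil (old new : List Char) : pvF old new [] = [] := by simp [pvF]

lemma pvF_pos (old new : List Char) (s : List Char) (hne : old ≠ []) (h : old <+: s) :
    pvF old new s = new ++ pvF old new (s.drop old.length) := by
  cases s with
  | nil =>
    rcases h with ⟨t, ht⟩
    cases old with
    | nil => exact absurd rfl hne
    | cons a as => simp at ht
  | cons c t =>
    rw [pvF, dif_pos ⟨List.isPrefixOf_iff_prefix.mpr h, hne⟩]

lemma pvF_neg (old new : List Char) (c : Char) (t : List Char) (h : ¬ old <+: (c :: t)) :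
    pvF old new (c :: t) = c :: pvF old new t := by
  have h' : ¬ (old.isPrefixOf (c :: t) = true ∧ old ≠ []) :=
    fun hc => h (List.isPrefixOf_iff_prefix.mp hc.1)
  rw [pvF, dif_neg h']

lemma pvGo_eq (old new : List Char) (hne : old ≠ []) :
    ∀ fuel l acc, l.length ≤ fuel →
      PySem.Chars.replace.go old new fuel l acc = acc.reverse ++ pvF old new l := by
  intro fuel
  induction fuel with
  | zero =>
    intro l acc hl
    have : l = [] := List.eq_nil_of_length_eq_zero (Nat.le_zero.mp hl)
    subst this
    simp [PySem.Chars.replace.go, pvF_nil]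
  | succ n ih =>
    intro l acc hl
    cases l with
    | nil => simp [PySem.Chars.replace.go, pvF_nil]
    | cons c t =>
      rw [PySem.Chars.replace.go]
      by_cases h : old.isPrefixOf (c :: t)
      · have hpre : old <+: (c :: t) := List.isPrefixOf_iff_prefix.mp h
        have hlen : old.length ≠ 0 := by simpa using hne
        have hdrop : ((c :: t).drop old.length).length ≤ n := by
          simp at hl ⊢; omega
        simp only [h, if_pos]
        rw [ih _ _ hdrop, pvF_pos old new (c :: t) hne hpre]
        simp
      · have hpre : ¬ old <+: (c :: t) := fun hp => h (List.isPrefixOf_iff_prefix.mpr hp)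
        have ht : t.length ≤ n := by simp at hl; omega
        simp only [h, if_neg, Bool.false_eq_true, not_false_iff]
        rw [ih _ _ ht, pvF_neg old new c t hpre]
        simp

lemma pvReplace_eq (old new s : List Char) (hne : old ≠ []) :
    PySem.Chars.replace s old new = pvF old new s := by
  rw [PySem.Chars.replace]
  have : old.isEmpty = false := by simpa [List.isEmpty_iff] using hne
  rw [this]
  simpa using pvGo_eq old new hne s.length s [] le_rfl

lemma pvF_not_infix_id (old new : List Char) (s : List Char) (h : ¬ old <:+: s) :
    pvF old new s = s := by
  induction s with
  | nil => exact pvF_nil old new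
  | cons c t ih =>
    have h1 : ¬ old <+: (c :: t) := fun hp => h hp.isInfix
    rw [pvF_neg old new c t h1, ih (fun hi => h (List.infix_cons hi))]

lemma pvNotPrefix_eq_false {l₁ l₂ : List Char} (h : ¬ l₁ <+: l₂) : l₁.isPrefixOf l₂ = false := by
  rw [Bool.eq_false_iff]
  exact fun hc => h (List.isPrefixOf_iff_prefix.mp hc)

lemma pvPrefix_append_false (p l u : List Char) (h1 : ¬ p <+: l) (h2 : ¬ l <+: p) :
    ¬ p <+: l ++ u := by
  intro h
  rcases Nat.lt_or_ge l.length p.length with hlt | hle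
  · exact h2 (List.prefix_of_prefix_length_le (List.prefix_append l u) h (Nat.le_of_lt hlt))
  · exact h1 (List.prefix_of_prefix_length_le h (List.prefix_append l u) hle)

lemma pvF_pass (old new pref : List Char)
    (h : ∀ k < pref.length, ¬ old <+: pref.drop k ∧ ¬ pref.drop k <+: old) :
    ∀ u, pvF old new (pref ++ u) = pref ++ pvF old new u := by
  induction pref with
  | nil => intro u; simp
  | cons c pr ih =>
    intro u
    have h0 := h 0 (by simp)
    simp only [List.drop_zero] at h0
    have hnp : ¬ old <+: (c :: (pr ++ u)) := by
      have := pvPrefix_append_false old (c :: pr) u h0.1 h0.2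
      simpa using this
    rw [List.cons_append, pvF_neg old new c (pr ++ u) hnp,
        ih (fun k hk => by simpa using h (k + 1) (by simp; omega)) u]
    simp

lemma pvF_transfer (old p : List Char) (hp : '[' ∉ p) :
    ∀ n s k, s.length ≤ n → p.drop k ≠ [] → p.drop k <+: pvF old pvRED s → p.drop k <+: s := by
  intro n
  induction n with
  | zero =>
    intro s k hl hne hpre
    have : s = [] := List.eq_nil_of_length_eq_zero (Nat.le_zero.mp hl)
    subst this
    rw [pvF_nil] at hpre
    exact absurd (List.prefix_nil.mp hpre) hne
  | succ n ih =>
    intro s k hl hne hpre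
    cases s with
    | nil =>
      rw [pvF_nil] at hpre
      exact absurd (List.prefix_nil.mp hpre) hne
    | cons c t =>
      rcases hq : p.drop k with _ | ⟨a, rest⟩
      · exact absurd hq hne
      have ha : a ∈ p := by
        have : a ∈ p.drop k := by rw [hq]; simp
        exact List.mem_of_mem_drop this
      by_cases hm : old <+: (c :: t) ∧ old ≠ []
      · rw [pvF_pos old pvRED (c :: t) hm.2 hm.1] at hpre
        rw [hq] at hpre
        have : a = '[' := by
          rcases hpre with ⟨w, hw⟩
          simpa [pvRED] using congrArg (fun l => l.head?) hw
        exact absurd (this ▸ ha) hp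
      · have hnpre : ¬ (old.isPrefixOf (c :: t) ∧ old ≠ []) := by
          intro hc; exact hm ⟨List.isPrefixOf_iff_prefix.mp hc.1, hc.2⟩
        have : pvF old pvRED (c :: t) = c :: pvF old pvRED t := by
          rw [pvF, dif_neg hnpre]
        rw [this, hq] at hpre
        rcases hpre with ⟨w, hw⟩
        simp at hw
        obtain ⟨hac, hrest⟩ := hw
        have hrest' : rest <+: pvF old pvRED t := ⟨w, hrest⟩
        have hdrop1 : p.drop (k + 1) = rest := by
          have : (p.drop k).drop 1 = rest := by rw [hq]; simp
          rwa [List.drop_drop] at this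
        rcases eq_or_ne rest [] with hre | hre
        · rw [hre, hac]
          exact ⟨t, by simp⟩
        · have ht : t.length ≤ n := by simp at hl; omega
          have := ih t (k + 1) ht (hdrop1 ▸ hre) (hdrop1 ▸ hrest')
          rw [hdrop1] at this
          rcases this with ⟨w2, hw2⟩
          exact ⟨w2, by simp [hac, hw2]⟩

-- one scan step survives an earlier pass: if p does not start at this position of the original,
-- it does not start there after an earlier pattern's replacements either
lemma pvCons_transfer (old p : List Char) (hp : '[' ∉ p) (hpne : p ≠ []) (c : Char) (t : List Char)
    (h : ¬ p <+: (c :: t)) : ¬ p <+: c :: pvF old pvRED t := by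
  intro hpre
  rcases hq : p with _ | ⟨a, rest⟩
  · exact hpne hq
  rw [hq] at hpre h
  rcases hpre with ⟨w, hw⟩
  simp at hw
  obtain ⟨hac, hrest⟩ := hw
  have hrest' : rest <+: pvF old pvRED t := ⟨w, hrest⟩
  rcases eq_or_ne rest [] with hre | hre
  · exact h (by rw [hre, hac]; exact ⟨t, by simp⟩)
  · have hd : p.drop 1 = rest := by rw [hq]; simp
    have := pvF_transfer old p hp t.length t 1 le_rfl (hd ▸ hre) (hd ▸ hrest')
    rw [hd] at this
    rcases this with ⟨w2, hw2⟩
    exact h ⟨w2, by rw [hac]; simp [hw2]⟩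

-- abbreviations for the four passes
def pvF1 : List Char → List Char := pvF pvP1 pvRED
def pvF2 : List Char → List Char := pvF pvP2 pvRED
def pvF3 : List Char → List Char := pvF pvP3 pvRED
def pvF4 : List Char → List Char := pvF pvP4 pvRED

lemma pvMain : ∀ n s, s.length ≤ n → pvRedact s = pvF4 (pvF3 (pvF2 (pvF1 s))) := by
  intro n
  induction n with
  | zero =>
    intro s hl
    have : s = [] := List.eq_nil_of_length_eq_zero (Nat.le_zero.mp hl)
    subst this
    simp [pvRedact, pvF1, pvF2, pvF3, pvF4, pvF_nil]
  | succ n ih =>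
    intro s hl
    cases s with
    | nil => simp [pvRedact, pvF1, pvF2, pvF3, pvF4, pvF_nil]
    | cons c t0 =>
    by_cases h1 : pvP1 <+: (c :: t0)
    · rcases h1 with ⟨t, ht⟩
      have hred : pvRedact (c :: t0) = pvRED ++ pvRedact t := by
        rw [pvRedact]
        have : pvP1.isPrefixOf (c :: t0) = true := List.isPrefixOf_iff_prefix.mpr ⟨t, ht⟩
        rw [if_pos this, ← ht, List.drop_left]
      have hF1 : pvF1 (c :: t0) = pvRED ++ pvF1 t := by
        rw [pvF1, pvF_pos pvP1 pvRED (c :: t0) (by decide) ⟨t, ht⟩, ← ht, List.drop_left]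
      have ht' : t.length ≤ n := by
        have := congrArg List.length ht; simp [pvP1] at this ⊢; simp at hl; omega
      rw [hred, hF1, pvF2, pvF_pass pvP2 pvRED pvRED (by decide),
          pvF3, pvF_pass pvP3 pvRED pvRED (by decide),
          pvF4, pvF_pass pvP4 pvRED pvRED (by decide), ih t ht']
      rfl
    · by_cases h2 : pvP2 <+: (c :: t0)
      · rcases h2 with ⟨t, ht⟩
        have hred : pvRedact (c :: t0) = pvRED ++ pvRedact t := by
          rw [pvRedact]
          have h1' : pvP1.isPrefixOf (c :: t0) = false := pvNotPrefix_eq_false h1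
          have h2' : pvP2.isPrefixOf (c :: t0) = true := List.isPrefixOf_iff_prefix.mpr ⟨t, ht⟩
          rw [h1']
          simp only [Bool.false_eq_true, if_false]
          rw [if_pos h2', ← ht, List.drop_left]
        have hF1 : pvF1 (c :: t0) = pvP2 ++ pvF1 t := by
          rw [← ht, pvF1, pvF_pass pvP1 pvRED pvP2 (by decide)]
        have hF2 : pvF2 (pvP2 ++ pvF1 t) = pvRED ++ pvF2 (pvF1 t) := by
          rw [pvF2, pvF_pos pvP2 pvRED _ (by decide) (List.prefix_append _ _), List.drop_left]
        have ht' : t.length ≤ n := by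
          have := congrArg List.length ht; simp [pvP2] at this ⊢; simp at hl; omega
        rw [hred, hF1, hF2, pvF3, pvF_pass pvP3 pvRED pvRED (by decide),
            pvF4, pvF_pass pvP4 pvRED pvRED (by decide), ih t ht']
        rfl
      · by_cases h3 : pvP3 <+: (c :: t0)
        · rcases h3 with ⟨t, ht⟩
          have hred : pvRedact (c :: t0) = pvRED ++ pvRedact t := by
            rw [pvRedact]
            have h1' : pvP1.isPrefixOf (c :: t0) = false := pvNotPrefix_eq_false h1
            have h2' : pvP2.isPrefixOf (c :: t0) = false := pvNotPrefix_eq_false h2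
            have h3' : pvP3.isPrefixOf (c :: t0) = true := List.isPrefixOf_iff_prefix.mpr ⟨t, ht⟩
            rw [h1', h2']
            simp only [Bool.false_eq_true, if_false]
            rw [if_pos h3', ← ht, List.drop_left]
          have hF1 : pvF1 (c :: t0) = pvP3 ++ pvF1 t := by
            rw [← ht, pvF1, pvF_pass pvP1 pvRED pvP3 (by decide)]
          have hF2 : pvF2 (pvP3 ++ pvF1 t) = pvP3 ++ pvF2 (pvF1 t) := by
            rw [pvF2, pvF_pass pvP2 pvRED pvP3 (by decide)]
          have hF3 : pvF3 (pvP3 ++ pvF2 (pvF1 t)) = pvRED ++ pvF3 (pvF2 (pvF1 t)) := by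
            rw [pvF3, pvF_pos pvP3 pvRED _ (by decide) (List.prefix_append _ _), List.drop_left]
          have ht' : t.length ≤ n := by
            have := congrArg List.length ht; simp [pvP3] at this ⊢; simp at hl; omega
          rw [hred, hF1, hF2, hF3, pvF4, pvF_pass pvP4 pvRED pvRED (by decide), ih t ht']
          rfl
        · by_cases h4 : pvP4 <+: (c :: t0)
          · rcases h4 with ⟨t, ht⟩
            have hred : pvRedact (c :: t0) = pvRED ++ pvRedact t := by
              rw [pvRedact]
              have h1' : pvP1.isPrefixOf (c :: t0) = false := pvNotPrefix_eq_false h1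
              have h2' : pvP2.isPrefixOf (c :: t0) = false := pvNotPrefix_eq_false h2
              have h3' : pvP3.isPrefixOf (c :: t0) = false := pvNotPrefix_eq_false h3
              have h4' : pvP4.isPrefixOf (c :: t0) = true := List.isPrefixOf_iff_prefix.mpr ⟨t, ht⟩
              rw [h1', h2', h3']
              simp only [Bool.false_eq_true, if_false]
              rw [if_pos h4', ← ht, List.drop_left]
            have hF1 : pvF1 (c :: t0) = pvP4 ++ pvF1 t := by
              rw [← ht, pvF1, pvF_pass pvP1 pvRED pvP4 (by decide)]
            have hF2 : pvF2 (pvP4 ++ pvF1 t) = pvP4 ++ pvF2 (pvF1 t) := by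
              rw [pvF2, pvF_pass pvP2 pvRED pvP4 (by decide)]
            have hF3 : pvF3 (pvP4 ++ pvF2 (pvF1 t)) = pvP4 ++ pvF3 (pvF2 (pvF1 t)) := by
              rw [pvF3, pvF_pass pvP3 pvRED pvP4 (by decide)]
            have hF4 : pvF4 (pvP4 ++ pvF3 (pvF2 (pvF1 t))) = pvRED ++ pvF4 (pvF3 (pvF2 (pvF1 t))) := by
              rw [pvF4, pvF_pos pvP4 pvRED _ (by decide) (List.prefix_append _ _), List.drop_left]
            have ht' : t.length ≤ n := by
              have := congrArg List.length ht; simp [pvP4] at this ⊢; simp at hl; omega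
            rw [hred, hF1, hF2, hF3, hF4, ih t ht']
          · -- no pattern starts here: every pass copies c
            have hred : pvRedact (c :: t0) = c :: pvRedact t0 := by
              rw [pvRedact]
              have h1' : pvP1.isPrefixOf (c :: t0) = false := pvNotPrefix_eq_false h1
              have h2' : pvP2.isPrefixOf (c :: t0) = false := pvNotPrefix_eq_false h2
              have h3' : pvP3.isPrefixOf (c :: t0) = false := pvNotPrefix_eq_false h3
              have h4' : pvP4.isPrefixOf (c :: t0) = false := pvNotPrefix_eq_false h4
              rw [h1', h2', h3', h4']
              simp
            have ht' : t0.length ≤ n := by simp at hl; omega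
            have hF1 : pvF1 (c :: t0) = c :: pvF1 t0 := pvF_neg pvP1 pvRED c t0 h1
            have h2t : ¬ pvP2 <+: c :: pvF1 t0 :=
              pvCons_transfer pvP1 pvP2 (by decide) (by decide) c t0 h2
            have hF2 : pvF2 (c :: pvF1 t0) = c :: pvF2 (pvF1 t0) := pvF_neg pvP2 pvRED c _ h2t
            have h3t : ¬ pvP3 <+: c :: pvF2 (pvF1 t0) :=
              pvCons_transfer pvP2 pvP3 (by decide) (by decide) c (pvF1 t0)
                (pvCons_transfer pvP1 pvP3 (by decide) (by decide) c t0 h3)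
            have hF3 : pvF3 (c :: pvF2 (pvF1 t0)) = c :: pvF3 (pvF2 (pvF1 t0)) :=
              pvF_neg pvP3 pvRED c _ h3t
            have h4t : ¬ pvP4 <+: c :: pvF3 (pvF2 (pvF1 t0)) :=
              pvCons_transfer pvP3 pvP4 (by decide) (by decide) c (pvF2 (pvF1 t0))
                (pvCons_transfer pvP2 pvP4 (by decide) (by decide) c (pvF1 t0)
                  (pvCons_transfer pvP1 pvP4 (by decide) (by decide) c t0 h4))
            have hF4 : pvF4 (c :: pvF3 (pvF2 (pvF1 t0))) = c :: pvF4 (pvF3 (pvF2 (pvF1 t0))) :=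
              pvF_neg pvP4 pvRED c _ h4t
            rw [hred, hF1, hF2, hF3, hF4, ih t0 ht']

-- one pass of A (guarded replace) computes pvF on the char lists
lemma pvStep_toList (p s : String) (hne : p.toList ≠ []) :
    (if PySem.Str.isIn p s then PySem.Str.replace s p "[REDACTED]" else s).toList
      = pvF p.toList pvRED s.toList := by
  by_cases h : PySem.Str.isIn p s
  · rw [if_pos h, PySem.Str.toList_replace, pvReplace_eq _ _ _ hne]
    rfl
  · rw [if_neg h]
    have hfalse : PySem.Chars.isIn p.toList s.toList = false := by
      rw [← PySem.Str.isIn_eq]; simpa using h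
    have := (PySem.Chars.isIn_eq_false_iff p.toList s.toList).mp hfalse
    exact (pvF_not_infix_id p.toList pvRED s.toList this).symm

-- ===== VERDICT (by name: the statement is the Claim_ definition above) =====
theorem filter_output_spec : Claim_equal_filter_output := by
  intro content agent_id user_permissions _
  unfold Spec_filter_output
  rw [← String.toList_inj]
  have hA : (filter_output content agent_id user_permissions).toList
      = pvF4 (pvF3 (pvF2 (pvF1 content.toList))) := by
    unfold filter_output
    simp only [List.foldl]
    rw [pvStep_toList "ADMIN_TOKEN" _ (by decide),
        pvStep_toList "MASTER_KEY" _ (by decide),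
        pvStep_toList "API_SECRET" _ (by decide),
        pvStep_toList "DATABASE_PASSWORD" _ (by decide)]
    rfl
  rw [hA, ← pvMain content.toList.length content.toList le_rfl]
  unfold filter_output_alt
  simp
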